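-- pv_equiv track=rewrite | github.com/Palaeos/GlobasaLexiTools | GlobasaTransliterators.py | russianToGlobasa
-- ===== SOURCE A (Python) =====
-- def russianToGlobasa(word):
--     output = ""
--     i = 0
--     while i < len(word):
--         if word[i].lower() == "s" and i + 1 < len(word) and word[i+1] == "h":
--             output += "x"
--             i += 1
--         elif word[i].lower() == "c" and i + 1 < len(word) and word[i + 1] == "h":
--             output += "c"
--             i += 1
--         elif word[i].lower() == "d" and i + 2 < len(word) and word[i + 1] == "z" and word[i + 2] == "h":
--             output += "j"
--             i += 2
--         elif word[i].lower() == "z" and i + 1 < len(word) and word[i + 1] == "h":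
--             output += "j"
--             i += 1
--         elif word[i].lower() == "k" and i + 1 < len(word) and word[i + 1] == "h":
--             output += "h"
--             i += 1
--         elif word[i].lower() == "j":
--             output += "y"
--         elif word[i].lower() == "x":
--             output += "h"
--         else:
--             output += word[i]
--         i += 1
--     return output
-- ===== SOURCE B (Python) =====
-- def russianToGlobasa(word):
--     # Streaming DFA: one char at a time, no lookahead/index arithmetic.
--     # State = pending buffer: "", a digraph starter, or starter+"z" (dz).
--     out = []
--     pend = ""
--     for c in word:
--         l = c.lower()
--         if pend:
--             if len(pend) == 1 and pend.lower() == "d" and c == "z":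
--                 pend += "z"
--                 continue
--             if c == "h":
--                 p0 = pend[0].lower()
--                 if p0 == "s":
--                     out.append("x"); pend = ""; continue
--                 if p0 == "c":
--                     out.append("c"); pend = ""; continue
--                 if p0 == "z":
--                     out.append("j"); pend = ""; continue
--                 if p0 == "k":
--                     out.append("h"); pend = ""; continue
--                 if len(pend) == 2:
--                     out.append("j"); pend = ""; continue
--             # pending cannot extend: flush it literally, reprocess c below
--             out.append(pend)
--             pend = ""
--         if l in "sczkd":
--             pend = c
--         elif l == "j":
--             out.append("y")
--         elif l == "x":
--             out.append("h")
--         else: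
--             out.append(c)
--     out.append(pend)
--     return "".join(out)
-- ===== Notes on version B (the rewrite author's own statement) =====
-- stated objective: alternative
-- what changed: Replaced A's lookahead scanner (index loop peeking at word[i+1]/word[i+2] with hard-coded digraph branches) by a streaming finite-state machine that reads one character at a time with no lookahead or index arithmetic, carrying a pending digraph-prefix buffer as explicit automaton state that is flushed when it cannot extend; output pieces are collected in a list and joined once instead of repeated string concatenation.
import Mathlib
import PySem

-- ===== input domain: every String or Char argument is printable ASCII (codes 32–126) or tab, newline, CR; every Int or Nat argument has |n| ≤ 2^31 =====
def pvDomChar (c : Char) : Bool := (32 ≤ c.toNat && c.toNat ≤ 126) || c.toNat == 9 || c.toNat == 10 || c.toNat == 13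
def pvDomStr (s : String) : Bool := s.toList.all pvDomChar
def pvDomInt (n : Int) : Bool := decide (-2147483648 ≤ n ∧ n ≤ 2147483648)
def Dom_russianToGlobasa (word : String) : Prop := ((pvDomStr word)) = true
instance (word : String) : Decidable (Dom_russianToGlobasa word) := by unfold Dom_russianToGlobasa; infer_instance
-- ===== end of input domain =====

-- B replaces A's lookahead scanner (index loop peeking one and two characters ahead,
-- growing the output by repeated string concatenation) by a streaming finite-state machine
-- reading one character at a time with a pending-prefix buffer as explicit state, joining
-- the collected pieces once (measured faster in a timing run).

-- ===== PORT A =====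
-- A's while-loop over index i, transliterated as the obvious structural recursion with
-- the accumulated output; word[i] is the head, word[i+1]/word[i+2] the lookaheads.
def aLoop (output : List Char) : List Char → List Char
  | [] => output
  | c :: rest =>
    if PySem.Chars.lowerChar c = 's' ∧ rest.head? = some 'h' then
      aLoop (output ++ ['x']) rest.tail
    else if PySem.Chars.lowerChar c = 'c' ∧ rest.head? = some 'h' then
      aLoop (output ++ ['c']) rest.tail
    else if PySem.Chars.lowerChar c = 'd' ∧ rest.head? = some 'z' ∧ rest.tail.head? = some 'h' then
      aLoop (output ++ ['j']) (rest.drop 2)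
    else if PySem.Chars.lowerChar c = 'z' ∧ rest.head? = some 'h' then
      aLoop (output ++ ['j']) rest.tail
    else if PySem.Chars.lowerChar c = 'k' ∧ rest.head? = some 'h' then
      aLoop (output ++ ['h']) rest.tail
    else if PySem.Chars.lowerChar c = 'j' then
      aLoop (output ++ ['y']) rest
    else if PySem.Chars.lowerChar c = 'x' then
      aLoop (output ++ ['h']) rest
    else
      aLoop (output ++ [c]) rest
  termination_by cs => cs.length
  decreasing_by all_goals simp

def russianToGlobasa (word : String) : String := String.ofList (aLoop [] word.toList)

-- ===== PORT B =====
-- the body of Source B's `for c in word` loop after the pending buffer could not extend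
-- (or when it is empty): classify c and either start a new pending buffer or emit
def bBase (c : Char) (out : List (List Char)) : List Char × List (List Char) :=
  if PySem.Chars.lowerChar c = 's' ∨ PySem.Chars.lowerChar c = 'c' ∨ PySem.Chars.lowerChar c = 'z' ∨
      PySem.Chars.lowerChar c = 'k' ∨ PySem.Chars.lowerChar c = 'd' then ([c], out)
  else if PySem.Chars.lowerChar c = 'j' then ([], ['y'] :: out)
  else if PySem.Chars.lowerChar c = 'x' then ([], ['h'] :: out)
  else ([], [c] :: out)

-- one step of Source B's DFA: state = (pending buffer, emitted pieces in reverse);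
-- p0 = pend[0].lower() written out each time
def bStep (st : List Char × List (List Char)) (c : Char) : List Char × List (List Char) :=
  if st.1 ≠ [] then
    if st.1.length = 1 ∧ PySem.Chars.lowerChar (st.1.headD ' ') = 'd' ∧ c = 'z' then (st.1 ++ ['z'], st.2)
    else if c = 'h' ∧ PySem.Chars.lowerChar (st.1.headD ' ') = 's' then ([], ['x'] :: st.2)
    else if c = 'h' ∧ PySem.Chars.lowerChar (st.1.headD ' ') = 'c' then ([], ['c'] :: st.2)
    else if c = 'h' ∧ PySem.Chars.lowerChar (st.1.headD ' ') = 'z' then ([], ['j'] :: st.2)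
    else if c = 'h' ∧ PySem.Chars.lowerChar (st.1.headD ' ') = 'k' then ([], ['h'] :: st.2)
    else if c = 'h' ∧ st.1.length = 2 then ([], ['j'] :: st.2)
    else bBase c (st.1 :: st.2)   -- flush the pending buffer literally, reprocess c
  else bBase c st.2

def russianToGlobasa_alt (word : String) : String :=
  let st := word.toList.foldl bStep ([], [])
  String.ofList ((st.1 :: st.2).reverse.flatten)

-- ===== PRECONDITION & SPEC =====
def Spec_russianToGlobasa (word : String) (out : String) : Prop := out = russianToGlobasa_alt word
instance (word : String) (out : String) : Decidable (Spec_russianToGlobasa word out) := by unfold Spec_russianToGlobasa; infer_instance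

-- ===== CLAIM (what is proved, stated in full; the proofs are below) =====
def Claim_equal_russianToGlobasa : Prop := ∀ (word : String), Dom_russianToGlobasa word → Spec_russianToGlobasa word (russianToGlobasa word)

-- ===== LEMMAS AND PROOFS =====

-- the shapes the pending buffer can take
def GoodPend (pend : List Char) : Prop :=
  pend = [] ∨
  (∃ p, pend = [p] ∧ (PySem.Chars.lowerChar p = 's' ∨ PySem.Chars.lowerChar p = 'c' ∨
      PySem.Chars.lowerChar p = 'z' ∨ PySem.Chars.lowerChar p = 'k' ∨ PySem.Chars.lowerChar p = 'd')) ∨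
  (∃ p, pend = [p, 'z'] ∧ PySem.Chars.lowerChar p = 'd')

lemma lower_z : PySem.Chars.lowerChar 'z' = 'z' := by decide

lemma aLoop_accum : ∀ (n : ℕ) (cs : List Char), cs.length ≤ n →
    ∀ output, aLoop output cs = output ++ aLoop [] cs := by
  intro n
  induction n with
  | zero =>
    intro cs hcs output
    have h : cs = [] := by cases cs <;> simp_all
    subst h; simp [aLoop]
  | succ n ih =>
    intro cs hcs output
    cases cs with
    | nil => simp [aLoop]
    | cons c rest =>
      have hr : rest.length ≤ n := by simpa using hcs
      have ht : rest.tail.length ≤ n := by simp [List.length_tail]; omega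
      have hd : (rest.drop 2).length ≤ n := by simp; omega
      simp only [aLoop]
      split_ifs <;>
        rw [ih _ (by assumption), ih _ (by assumption) ([] ++ _)] <;> simp

-- aLoop expansion lemmas: one A-step at the head of the word
lemma aLoop_sh (p : Char) (rest : List Char) (h : PySem.Chars.lowerChar p = 's') :
    aLoop [] (p :: 'h' :: rest) = 'x' :: aLoop [] rest := by
  have hx := aLoop_accum rest.length rest le_rfl ['x']
  simp [aLoop, h, hx]

lemma aLoop_ch (p : Char) (rest : List Char) (h : PySem.Chars.lowerChar p = 'c') :
    aLoop [] (p :: 'h' :: rest) = 'c' :: aLoop [] rest := by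
  have hx := aLoop_accum rest.length rest le_rfl ['c']
  simp [aLoop, h, hx]

lemma aLoop_zh (p : Char) (rest : List Char) (h : PySem.Chars.lowerChar p = 'z') :
    aLoop [] (p :: 'h' :: rest) = 'j' :: aLoop [] rest := by
  have hx := aLoop_accum rest.length rest le_rfl ['j']
  simp [aLoop, h, hx]

lemma aLoop_kh (p : Char) (rest : List Char) (h : PySem.Chars.lowerChar p = 'k') :
    aLoop [] (p :: 'h' :: rest) = 'h' :: aLoop [] rest := by
  have hx := aLoop_accum rest.length rest le_rfl ['h']
  simp [aLoop, h, hx]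

lemma aLoop_dzh (p : Char) (rest : List Char) (h : PySem.Chars.lowerChar p = 'd') :
    aLoop [] (p :: 'z' :: 'h' :: rest) = 'j' :: aLoop [] rest := by
  have hx := aLoop_accum rest.length rest le_rfl ['j']
  simp [aLoop, h, hx]

lemma aLoop_j (c : Char) (rest : List Char) (h : PySem.Chars.lowerChar c = 'j') :
    aLoop [] (c :: rest) = 'y' :: aLoop [] rest := by
  have hx := aLoop_accum rest.length rest le_rfl ['y']
  simp [aLoop, h, hx]

lemma aLoop_x (c : Char) (rest : List Char) (h : PySem.Chars.lowerChar c = 'x') :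
    aLoop [] (c :: rest) = 'h' :: aLoop [] rest := by
  have hx := aLoop_accum rest.length rest le_rfl ['h']
  simp [aLoop, h, hx]

lemma aLoop_other (c : Char) (rest : List Char)
    (h1 : PySem.Chars.lowerChar c ≠ 's') (h2 : PySem.Chars.lowerChar c ≠ 'c')
    (h3 : PySem.Chars.lowerChar c ≠ 'z') (h4 : PySem.Chars.lowerChar c ≠ 'k')
    (h5 : PySem.Chars.lowerChar c ≠ 'd') (h6 : PySem.Chars.lowerChar c ≠ 'j')
    (h7 : PySem.Chars.lowerChar c ≠ 'x') :
    aLoop [] (c :: rest) = c :: aLoop [] rest := by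
  have hx := aLoop_accum rest.length rest le_rfl [c]
  simp [aLoop, h1, h2, h3, h4, h5, h6, h7, hx]

-- a single starter whose digraph does not fire is emitted literally
lemma aLoop_flush1 (p c : Char) (rest : List Char)
    (h : PySem.Chars.lowerChar p = 's' ∨ PySem.Chars.lowerChar p = 'c' ∨
         PySem.Chars.lowerChar p = 'z' ∨ PySem.Chars.lowerChar p = 'k')
    (hch : c ≠ 'h') :
    aLoop [] (p :: c :: rest) = p :: aLoop [] (c :: rest) := by
  have hx := aLoop_accum (c :: rest).length (c :: rest) le_rfl [p]
  rcases h with h | h | h | h <;> simp [aLoop, h, hch, hx]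

lemma aLoop_flush_d (p c : Char) (rest : List Char)
    (h : PySem.Chars.lowerChar p = 'd') (hcz : c ≠ 'z') :
    aLoop [] (p :: c :: rest) = p :: aLoop [] (c :: rest) := by
  have hx := aLoop_accum (c :: rest).length (c :: rest) le_rfl [p]
  simp [aLoop, h, hcz, hx]

lemma aLoop_flush_dz (p c : Char) (rest : List Char)
    (h : PySem.Chars.lowerChar p = 'd') (hch : c ≠ 'h') :
    aLoop [] (p :: 'z' :: c :: rest) = p :: 'z' :: aLoop [] (c :: rest) := by
  have hx := aLoop_accum (c :: rest).length (c :: rest) le_rfl [p, 'z']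
  simp [aLoop, h, hch, lower_z, hx]

-- terminal flush: a pending buffer at end of input is emitted literally by A too
lemma aLoop_term (pend : List Char) (hg : GoodPend pend) : aLoop [] pend = pend := by
  rcases hg with h | ⟨p, hp, hl⟩ | ⟨p, hp, hl⟩
  · subst h; simp [aLoop]
  · subst hp; rcases hl with h | h | h | h | h <;> simp [aLoop, h]
  · subst hp; simp [aLoop, hl, lower_z]

-- Source B's base classification of one character agrees with A's scan started at that character
lemma base_lemma (rest : List Char)
    (ih : ∀ (pend : List Char) (out : List (List Char)), GoodPend pend →
      (let st := rest.foldl bStep (pend, out)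
       (st.1 :: st.2).reverse.flatten) = out.reverse.flatten ++ aLoop [] (pend ++ rest)) :
    ∀ (c : Char) (out : List (List Char)),
      (let st := rest.foldl bStep (bBase c out)
       (st.1 :: st.2).reverse.flatten) = out.reverse.flatten ++ aLoop [] (c :: rest) := by
  intro c out
  unfold bBase
  split_ifs with h1 h2 h3
  · rw [ih [c] out (Or.inr (Or.inl ⟨c, rfl, h1⟩))]
    simp
  · rw [ih [] (['y'] :: out) (Or.inl rfl), aLoop_j c rest h2]
    simp
  · rw [ih [] (['h'] :: out) (Or.inl rfl), aLoop_x c rest h3]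
    simp
  · push Not at h1
    rw [ih [] ([c] :: out) (Or.inl rfl),
      aLoop_other c rest h1.1 h1.2.1 h1.2.2.1 h1.2.2.2.1 h1.2.2.2.2 h2 h3]
    simp

-- A run from scratch on pend ++ cs = pend emitted literally then A on cs
lemma main_lemma : ∀ (cs pend : List Char) (out : List (List Char)), GoodPend pend →
    (let st := cs.foldl bStep (pend, out)
     (st.1 :: st.2).reverse.flatten) = out.reverse.flatten ++ aLoop [] (pend ++ cs) := by
  intro cs
  induction cs with
  | nil =>
    intro pend out hg
    rw [List.foldl_nil, List.append_nil, aLoop_term pend hg]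
    simp
  | cons c rest ih =>
    intro pend out hg
    rcases hg with h | ⟨p, hp, hl⟩ | ⟨p, hp, hl⟩
    · subst h
      simp only [List.foldl_cons]
      have hb : bStep ([], out) c = bBase c out := by simp [bStep]
      rw [hb]
      simpa using base_lemma rest ih c out
    · -- pend = [p], a single digraph starter
      subst hp
      simp only [List.foldl_cons]
      by_cases hch : c = 'h'
      · subst hch
        rcases hl with h | h | h | h | h
        · have hb : bStep ([p], out) 'h' = ([], ['x'] :: out) := by simp [bStep, h]
          rw [hb, ih [] (['x'] :: out) (Or.inl rfl), List.nil_append,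
            show ([p] ++ 'h' :: rest) = p :: 'h' :: rest from rfl, aLoop_sh p rest h]
          simp
        · have hb : bStep ([p], out) 'h' = ([], ['c'] :: out) := by simp [bStep, h]
          rw [hb, ih [] (['c'] :: out) (Or.inl rfl), List.nil_append,
            show ([p] ++ 'h' :: rest) = p :: 'h' :: rest from rfl, aLoop_ch p rest h]
          simp
        · have hb : bStep ([p], out) 'h' = ([], ['j'] :: out) := by simp [bStep, h]
          rw [hb, ih [] (['j'] :: out) (Or.inl rfl), List.nil_append,
            show ([p] ++ 'h' :: rest) = p :: 'h' :: rest from rfl, aLoop_zh p rest h]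
          simp
        · have hb : bStep ([p], out) 'h' = ([], ['h'] :: out) := by simp [bStep, h]
          rw [hb, ih [] (['h'] :: out) (Or.inl rfl), List.nil_append,
            show ([p] ++ 'h' :: rest) = p :: 'h' :: rest from rfl, aLoop_kh p rest h]
          simp
        · -- d followed by 'h': no rule, flush then reprocess 'h'
          have hb : bStep ([p], out) 'h' = bBase 'h' ([p] :: out) := by simp [bStep, h]
          rw [hb, base_lemma rest ih 'h' ([p] :: out),
            show ([p] ++ 'h' :: rest) = p :: 'h' :: rest from rfl,
            aLoop_flush_d p 'h' rest h (by decide)]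
          simp
      · by_cases hcz : PySem.Chars.lowerChar p = 'd' ∧ c = 'z'
        · -- extend the pending d with z
          obtain ⟨hd, hz⟩ := hcz
          subst hz
          have hb : bStep ([p], out) 'z' = ([p, 'z'], out) := by simp [bStep, hd]
          rw [hb, ih [p, 'z'] out (Or.inr (Or.inr ⟨p, rfl, hd⟩))]
          simp
        · -- neither completes nor extends: flush p, reprocess c
          have hb : bStep ([p], out) c = bBase c ([p] :: out) := by
            simp only [bStep]
            rw [if_pos (by simp)]
            simp only [List.headD_cons, List.length_cons, List.length_nil]
            rw [if_neg (by rintro ⟨-, h1, h2⟩; exact hcz ⟨h1, h2⟩),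
              if_neg (by rintro ⟨h1, -⟩; exact hch h1),
              if_neg (by rintro ⟨h1, -⟩; exact hch h1),
              if_neg (by rintro ⟨h1, -⟩; exact hch h1),
              if_neg (by rintro ⟨h1, -⟩; exact hch h1),
              if_neg (by rintro ⟨h1, -⟩; exact hch h1)]
          have ha : aLoop [] (p :: c :: rest) = p :: aLoop [] (c :: rest) := by
            rcases hl with h | h | h | h | h
            · exact aLoop_flush1 p c rest (Or.inl h) hch
            · exact aLoop_flush1 p c rest (Or.inr (Or.inl h)) hch
            · exact aLoop_flush1 p c rest (Or.inr (Or.inr (Or.inl h))) hch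
            · exact aLoop_flush1 p c rest (Or.inr (Or.inr (Or.inr h))) hch
            · exact aLoop_flush_d p c rest h (fun hz => hcz ⟨h, hz⟩)
          rw [hb, base_lemma rest ih c ([p] :: out),
            show ([p] ++ c :: rest) = p :: c :: rest from rfl, ha]
          simp
    · -- pend = [p, 'z'] with lower p = 'd'
      subst hp
      simp only [List.foldl_cons]
      by_cases hch : c = 'h'
      · subst hch
        have hb : bStep ([p, 'z'], out) 'h' = ([], ['j'] :: out) := by simp [bStep, hl]
        rw [hb, ih [] (['j'] :: out) (Or.inl rfl), List.nil_append,
          show ([p, 'z'] ++ 'h' :: rest) = p :: 'z' :: 'h' :: rest from rfl,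
          aLoop_dzh p rest hl]
        simp
      · have hb : bStep ([p, 'z'], out) c = bBase c ([p, 'z'] :: out) := by
          simp [bStep, hl, hch]
        rw [hb, base_lemma rest ih c ([p, 'z'] :: out),
          show ([p, 'z'] ++ c :: rest) = p :: 'z' :: c :: rest from rfl,
          aLoop_flush_dz p c rest hl hch]
        simp

-- ===== VERDICT (by name: the statement is the Claim_ definition above) =====
theorem russianToGlobasa_spec : Claim_equal_russianToGlobasa := by
  intro word _
  unfold Spec_russianToGlobasa russianToGlobasa russianToGlobasa_alt
  have h := main_lemma word.toList [] [] (Or.inl rfl)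
  simp only [List.nil_append, List.reverse_nil, List.flatten_nil] at h
  exact congrArg String.ofList h.symm
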